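-- pv_equiv track=rewrite | github.com/YS-2357/Coding_Test | Programmers/코딩테스트 고득점 Kit/탐욕법(greedy)/42862_체육복.py | solution
-- ===== SOURCE A (Python) =====
-- def solution(n, lost, reserve):
--     # reserve와 lost에 모두 있는 학생은 여벌을 잃어버렸다고 간주 → 제거
--     real_lost = [l for l in lost if l not in reserve]
--     real_reserve = [r for r in reserve if r not in lost]
--
--     # 그리디 탐색을 위해 정렬
--     real_lost.sort()
--     real_reserve.sort()
--
--     # 기본적으로는 체육복이 없는 학생 수만큼 수업을 못 들음
--     answer = n - len(real_lost)
--
--     # 체육복을 빌릴 수 있는지 체크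
--     for number in real_lost:
--         if number - 1 in real_reserve:
--             real_reserve.remove(number - 1)
--             answer += 1
--         elif number + 1 in real_reserve:
--             real_reserve.remove(number + 1)
--             answer += 1
--
--     return answer
-- ===== SOURCE B (Python) =====
-- def solution(n, lost, reserve):
--     lost_set = set(lost)
--     res_set = set(reserve)
--     ls = sorted(x for x in lost if x not in res_set)
--     rs = sorted(x for x in reserve if x not in lost_set)
--     answer = n - len(ls)
--     j = 0
--     for x in ls:
--         while j < len(rs) and rs[j] < x - 1:
--             j += 1
--         if j == len(rs):
--             break
--         if rs[j] == x - 1 or rs[j] == x + 1: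
--             j += 1
--             answer += 1
--     return answer
-- ===== Notes on version B (the rewrite author's own statement) =====
-- stated objective: faster
-- what changed: Replaces the per-lost-student membership test and list.remove scan over the reserve list with a single two-pointer merge sweep over the two sorted lists (set-based filtering of the overlap).
import Mathlib
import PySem

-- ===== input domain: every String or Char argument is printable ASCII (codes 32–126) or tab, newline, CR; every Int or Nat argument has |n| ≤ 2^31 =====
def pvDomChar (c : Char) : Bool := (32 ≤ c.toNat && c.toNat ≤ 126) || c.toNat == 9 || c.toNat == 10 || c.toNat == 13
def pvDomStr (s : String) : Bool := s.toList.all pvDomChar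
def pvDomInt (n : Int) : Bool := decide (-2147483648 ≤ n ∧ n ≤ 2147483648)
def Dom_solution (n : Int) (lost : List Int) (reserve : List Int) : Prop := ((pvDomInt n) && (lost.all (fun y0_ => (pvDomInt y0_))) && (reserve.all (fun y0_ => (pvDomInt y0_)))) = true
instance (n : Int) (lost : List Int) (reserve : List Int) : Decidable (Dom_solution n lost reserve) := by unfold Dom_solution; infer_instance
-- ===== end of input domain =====

-- B replaces A's per-lost-student membership test + list.remove scan with a single
-- two-pointer merge sweep over the two sorted filtered lists (objective: faster).


-- ===== PORT A =====
-- the for-loop over real_lost; real_reserve.remove(v) after 'v in real_reserve' is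
-- List.erase (first occurrence; exact by PySem.List.remove?_eq_some_erase)
def aLoop (ls : List Int) (rr : List Int) (acc : Int) : Int :=
  match ls with
  | [] => acc
  | x :: xs =>
    if (x - 1) ∈ rr then aLoop xs (rr.erase (x - 1)) (acc + 1)
    else if (x + 1) ∈ rr then aLoop xs (rr.erase (x + 1)) (acc + 1)
    else aLoop xs rr acc

def solution (n : Int) (lost : List Int) (reserve : List Int) : Int :=
  let realLost := PySem.List.sorted (lost.filter (fun l => !(reserve.contains l))) (fun x => x) false
  let realReserve := PySem.List.sorted (reserve.filter (fun r => !(lost.contains r))) (fun x => x) false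
  aLoop realLost realReserve (n - realLost.length)

-- ===== PORT B =====
-- the two-pointer sweep: the reserve pointer j is the suffix rs of the sorted reserve list
def bLoop (ls : List Int) (rs : List Int) (acc : Int) : Int :=
  match ls, rs with
  | [], _ => acc
  | _ :: _, [] => acc
  | x :: xs, r :: rt =>
    if r < x - 1 then bLoop (x :: xs) rt acc
    else if r = x - 1 ∨ r = x + 1 then bLoop xs rt (acc + 1)
    else bLoop xs (r :: rt) acc
termination_by (ls.length, rs.length)

def solution_alt (n : Int) (lost : List Int) (reserve : List Int) : Int :=
  let lostSet := PySem.Set.ofList lost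
  let resSet := PySem.Set.ofList reserve
  let ls := PySem.List.sorted (lost.filter (fun x => !(PySem.Set.contains resSet x))) (fun x => x) false
  let rs := PySem.List.sorted (reserve.filter (fun x => !(PySem.Set.contains lostSet x))) (fun x => x) false
  bLoop ls rs (n - ls.length)

-- ===== PRECONDITION & SPEC =====
def Spec_solution (n : Int) (lost : List Int) (reserve : List Int) (out : Int) : Prop := out = solution_alt n lost reserve
instance (n : Int) (lost : List Int) (reserve : List Int) (out : Int) : Decidable (Spec_solution n lost reserve out) := by unfold Spec_solution; infer_instance

-- ===== CLAIM (what is proved, stated in full; the proofs are below) =====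
def Claim_equal_solution : Prop := ∀ (n : Int) (lost : List Int) (reserve : List Int), Dom_solution n lost reserve → Spec_solution n lost reserve (solution n lost reserve)

-- ===== LEMMAS AND PROOFS =====

theorem aLoop_of_all_lt (ls P : List Int) (acc : Int)
    (hP : ∀ p ∈ P, ∀ x ∈ ls, p < x - 1) : aLoop ls P acc = acc := by
  induction ls generalizing acc with
  | nil => rfl
  | cons x xs ih =>
    have h1 : (x - 1) ∉ P := by intro h; have := hP _ h x (by simp); omega
    have h2 : (x + 1) ∉ P := by intro h; have := hP _ h x (by simp); omega
    simp only [aLoop, h1, h2, if_false]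
    exact ih acc (fun p hp x' hx' => hP p hp x' (by simp [hx']))

theorem aLoop_eq_bLoop (ls S P : List Int) (acc : Int)
    (hls : ls.Pairwise (· ≤ ·)) (hPS : (P ++ S).Pairwise (· ≤ ·))
    (hP : ∀ p ∈ P, ∀ x ∈ ls, p < x - 1)
    (hdisj : ∀ x ∈ ls, x ∉ P ++ S) :
    aLoop ls (P ++ S) acc = bLoop ls S acc := by
  induction ls, S, acc using bLoop.induct generalizing P with
  | case1 rs acc => simp [aLoop, bLoop]
  | case2 acc x xs =>
    rw [List.append_nil] at hPS hdisj ⊢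
    simp only [bLoop]
    exact aLoop_of_all_lt _ _ _ hP
  | case3 acc x xs r rt hlt ih =>
    -- r < x - 1 : pointer skips r, i.e. r moves into the passed prefix P
    simp only [bLoop, if_pos hlt]
    rw [show P ++ r :: rt = (P ++ [r]) ++ rt by simp]
    refine ih (P ++ [r]) hls (by simpa using hPS) ?_ (by simpa using hdisj)
    intro p hp y hy
    rcases List.mem_append.1 hp with h | h
    · exact hP p h y hy
    · have hr : p = r := by simpa using h
      have hxy : x ≤ y := by
        rcases hy with _ | hy
        · omega
        · exact List.rel_of_pairwise_cons hls (by assumption)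
      omega
  | case4 acc x xs r rt hnlt heq ih =>
    -- r = x - 1 or r = x + 1 : borrow
    have hxS : x ∉ P ++ r :: rt := hdisj x (by simp)
    have hSsort : (r :: rt).Pairwise (· ≤ ·) := hPS.sublist (List.sublist_append_right _ _)
    have hrle : ∀ y ∈ rt, r ≤ y := fun y hy => List.rel_of_pairwise_cons hSsort hy
    have hxm1P : (x - 1) ∉ P := by intro h; have := hP _ h x (by simp); omega
    have hxp1P : (x + 1) ∉ P := by intro h; have := hP _ h x (by simp); omega
    have hxs_sorted : xs.Pairwise (· ≤ ·) := hls.sublist (List.sublist_cons_self _ _)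
    have hxle : ∀ y ∈ xs, x ≤ y := fun y hy => List.rel_of_pairwise_cons hls hy
    have hPrt : (P ++ rt).Pairwise (· ≤ ·) := by
      refine hPS.sublist ?_
      exact List.Sublist.append (List.Sublist.refl _) (List.sublist_cons_self _ _)
    have hPnext : ∀ p ∈ P, ∀ y ∈ xs, p < y - 1 := fun p hp y hy => by
      have := hP p hp x (by simp); have := hxle y hy; omega
    have hdnext : ∀ y ∈ xs, y ∉ P ++ rt := fun y hy h => by
      refine hdisj y (by simp [hy]) ?_
      rcases List.mem_append.1 h with h | h
      · exact List.mem_append.2 (Or.inl h)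
      · exact List.mem_append.2 (Or.inr (by simp [h]))
    simp only [bLoop, if_neg hnlt, if_pos heq]
    rcases heq with heq | heq
    · -- r = x - 1
      have hmem : (x - 1) ∈ P ++ r :: rt := by simp [← heq]
      have herase : (P ++ r :: rt).erase (x - 1) = P ++ rt := by
        rw [List.erase_append_right _ hxm1P, ← heq, List.erase_cons_head]
      rw [show aLoop (x :: xs) (P ++ r :: rt) acc =
            aLoop xs ((P ++ r :: rt).erase (x - 1)) (acc + 1) by
          simp only [aLoop, if_pos hmem], herase]
      exact ih P hxs_sorted hPrt hPnext hdnext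
    · -- r = x + 1 (then x - 1 is in neither P nor the suffix)
      have hxm1S : (x - 1) ∉ r :: rt := by
        intro h
        rcases h with _ | h
        · omega
        · have := hrle _ (by assumption); omega
      have hnm : (x - 1) ∉ P ++ r :: rt := by
        intro h; rcases List.mem_append.1 h with h | h
        · exact hxm1P h
        · exact hxm1S h
      have hmem : (x + 1) ∈ P ++ r :: rt := by simp [← heq]
      have herase : (P ++ r :: rt).erase (x + 1) = P ++ rt := by
        rw [List.erase_append_right _ hxp1P, ← heq, List.erase_cons_head]
      rw [show aLoop (x :: xs) (P ++ r :: rt) acc =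
            aLoop xs ((P ++ r :: rt).erase (x + 1)) (acc + 1) by
          simp only [aLoop, if_neg hnm, if_pos hmem], herase]
      exact ih P hxs_sorted hPrt hPnext hdnext
  | case5 acc x xs r rt hnlt hne ih =>
    -- r ≥ x - 1, r ≠ x - 1, r ≠ x + 1, and r ≠ x by disjointness ⇒ r ≥ x + 2: no borrow
    have hne1 : r ≠ x - 1 := fun h => hne (Or.inl h)
    have hne2 : r ≠ x + 1 := fun h => hne (Or.inr h)
    have hxS : x ∉ P ++ r :: rt := hdisj x (by simp)
    have hrx : r ≠ x := fun h => hxS (by simp [← h])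
    have hr2 : x + 2 ≤ r := by omega
    have hSsort : (r :: rt).Pairwise (· ≤ ·) := hPS.sublist (List.sublist_append_right _ _)
    have hrle : ∀ y ∈ rt, r ≤ y := fun y hy => List.rel_of_pairwise_cons hSsort hy
    have hxm1P : (x - 1) ∉ P := by intro h; have := hP _ h x (by simp); omega
    have hxp1P : (x + 1) ∉ P := by intro h; have := hP _ h x (by simp); omega
    have hxm1 : (x - 1) ∉ P ++ r :: rt := by
      intro h; rcases List.mem_append.1 h with h | h
      · exact hxm1P h
      · rcases h with _ | h
        · omega
        · have := hrle _ (by assumption); omega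
    have hxp1 : (x + 1) ∉ P ++ r :: rt := by
      intro h; rcases List.mem_append.1 h with h | h
      · exact hxp1P h
      · rcases h with _ | h
        · omega
        · have := hrle _ (by assumption); omega
    have hxs_sorted : xs.Pairwise (· ≤ ·) := hls.sublist (List.sublist_cons_self _ _)
    have hxle : ∀ y ∈ xs, x ≤ y := fun y hy => List.rel_of_pairwise_cons hls hy
    simp only [aLoop, if_neg hxm1, if_neg hxp1, bLoop, if_neg hnlt, if_neg hne]
    exact ih P hxs_sorted hPS
      (fun p hp y hy => by have := hP p hp x (by simp); have := hxle y hy; omega)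
      (fun y hy => hdisj y (by simp [hy]))

theorem filter_lost_eq (lost reserve : List Int) :
    lost.filter (fun x => !(PySem.Set.contains (PySem.Set.ofList reserve) x)) =
      lost.filter (fun l => !(reserve.contains l)) := by
  refine List.filter_congr (fun x _ => ?_)
  simp [PySem.Set.mem_ofList]

-- ===== VERDICT (by name: the statement is the Claim_ definition above) =====
theorem solution_spec : Claim_equal_solution := by
  intro n lost reserve _
  unfold Spec_solution solution solution_alt
  dsimp only
  rw [filter_lost_eq, filter_lost_eq]
  set ls := PySem.List.sorted (lost.filter (fun l => !(reserve.contains l))) (fun x => x) false with hls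
  set rs := PySem.List.sorted (reserve.filter (fun r => !(lost.contains r))) (fun x => x) false with hrs
  have h1 : ls.Pairwise (· ≤ ·) := PySem.List.sorted_pairwise _ _
  have h2 : rs.Pairwise (· ≤ ·) := PySem.List.sorted_pairwise _ _
  have hdisj : ∀ x ∈ ls, x ∉ ([] : List Int) ++ rs := by
    intro x hx hmem
    rw [hls, PySem.List.mem_sorted, List.mem_filter] at hx
    rw [List.nil_append, hrs, PySem.List.mem_sorted, List.mem_filter] at hmem
    have := hx.2
    have := hmem.2
    simp at *
    tauto
  have := aLoop_eq_bLoop ls rs [] (n - ls.length) h1 (by simpa using h2)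
    (by intro p hp; simp at hp) hdisj
  simpa using this
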